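-- pv_equiv track=rewrite | github.com/rushtokunal/python_algorithmic_problems | abc_encode_return_possibility.py | getLetterCombination
-- ===== SOURCE A (Python) =====
-- def createLetterMap():
--     letter_map={}
--     value=1
--     #this can be its own subroutine O(n)
--     for i in range(ord('a'),ord('z')+1):
--         letter_map.update({chr(i):value})
--         #increment value
--         value +=1
--     return (letter_map)
--
-- def getLetterCombination(input_data):
--     #parse input data to individual numbers and single
--     parse_input=[]
--     for idx in str(input_data):
--         parse_input.append(int(idx))
--     if len(str(input_data))==2:
--         parse_input.append(input_data)
--     letter_combination=[]
--     letter_map=createLetterMap()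
--     ret_string=str()
--     for key,val in letter_map.items():
--         for input in parse_input:
--             if len(str(val))==2 and val==input:
--                letter_combination.append(key)
--             elif val==input:
--                ret_string=ret_string+str(key)
--     if ret_string:
--         letter_combination.append(ret_string)
--     if not letter_combination:
--         letter_combination.append('0')
--     return(letter_combination)
-- ===== SOURCE B (Python) =====
-- def getLetterCombination(input_data):
--     # One counting pass over the digits replaces A's 26 x m scan of the letter map.
--     digits = [int(c) for c in str(input_data)]
--     counts = {}
--     for d in digits:
--         counts[d] = counts.get(d, 0) + 1
--     result = []
--     if 10 <= input_data <= 26: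
--         result.append(chr(ord('a') + input_data - 1))
--     letters = ''.join(chr(ord('a') + d - 1) * counts.get(d, 0) for d in range(1, 10))
--     if letters:
--         result.append(letters)
--     if not result:
--         result.append('0')
--     return result
-- ===== Notes on version B (the rewrite author's own statement) =====
-- stated objective: simpler
-- what changed: B drops the alphabet letter map and its nested scan of the parsed input: one counting pass over the digits plus a direct join over the single-digit letter values builds the letter string, and the sole possible two-digit letter is emitted by a direct range test on the input.
import Mathlib
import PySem

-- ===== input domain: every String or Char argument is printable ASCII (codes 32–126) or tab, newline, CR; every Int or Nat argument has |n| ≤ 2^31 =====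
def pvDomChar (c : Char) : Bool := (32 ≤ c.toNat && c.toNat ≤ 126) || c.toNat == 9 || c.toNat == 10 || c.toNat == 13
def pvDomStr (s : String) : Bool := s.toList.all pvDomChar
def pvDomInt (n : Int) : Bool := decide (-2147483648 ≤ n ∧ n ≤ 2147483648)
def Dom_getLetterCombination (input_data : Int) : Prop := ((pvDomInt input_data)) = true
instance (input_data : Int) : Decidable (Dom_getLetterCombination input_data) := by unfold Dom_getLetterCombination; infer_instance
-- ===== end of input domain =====

-- B replaces A's alphabet letter map and its nested scan of the parsed input by one counting
-- pass over the digits plus a direct range test for the single possible two-digit letter (simpler).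

-- ===== PORT A =====
def createLetterMap : PySem.Dict Char Int :=
  ((PySem.List.pyRange 97 123 1).foldl
    (fun (s : PySem.Dict Char Int × Int) i =>
      (s.1.insert (Char.ofNat i.toNat) s.2, s.2 + 1))
    (PySem.Dict.empty, 1)).1

def getLetterCombination (input_data : Int) : List String :=
  -- int(idx) raises ValueError only when input_data < 0 (the '-' char); excluded by Pre_, so `.getD 0` is unreachable
  let parse_input : List Int :=
    (PySem.Int.toChars input_data).foldl
      (fun acc c => acc ++ [(PySem.Int.ofChars? [c]).getD 0]) []
  let parse_input : List Int :=
    if (PySem.Int.toChars input_data).length = 2 then parse_input ++ [input_data] else parse_input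
  let letter_map := createLetterMap
  let s : List String × List Char :=
    letter_map.items.foldl
      (fun (s : List String × List Char) kv =>
        parse_input.foldl
          (fun (s : List String × List Char) inp =>
            if (PySem.Int.toChars kv.2).length = 2 ∧ kv.2 = inp then
              (s.1 ++ [String.singleton kv.1], s.2)
            else if kv.2 = inp then (s.1, s.2 ++ [kv.1])
            else s) s)
      ([], [])
  let letter_combination := if s.2 ≠ [] then s.1 ++ [String.ofList s.2] else s.1
  if letter_combination = [] then ["0"] else letter_combination

-- ===== PORT B =====
def getLetterCombination_alt (input_data : Int) : List String :=
  -- int(c) raises ValueError only when input_data < 0; excluded by Pre_, so `.getD 0` is unreachable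
  let digits : List Int :=
    (PySem.Int.toChars input_data).map (fun c => (PySem.Int.ofChars? [c]).getD 0)
  let counts : PySem.Dict Int Int :=
    digits.foldl (fun d x => d.modify x 0 (· + 1)) PySem.Dict.empty
  let result : List String :=
    if 10 ≤ input_data ∧ input_data ≤ 26 then
      [String.ofList [Char.ofNat ((96 + input_data).toNat)]] else []
  let letters : List Char :=
    (PySem.List.pyRange 1 10 1).flatMap
      (fun d => PySem.List.pyRepeat [Char.ofNat ((96 + d).toNat)] (counts.getD d 0))
  let result := if letters ≠ [] then result ++ [String.ofList letters] else result
  if result = [] then ["0"] else result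

-- ===== PRECONDITION & SPEC =====
-- A raises ValueError on negative input (int('-') on the sign character): exactly those inputs are excluded.
def Pre_getLetterCombination (input_data : Int) : Prop := 0 ≤ input_data
instance (input_data : Int) : Decidable (Pre_getLetterCombination input_data) := by unfold Pre_getLetterCombination; infer_instance
def pvWitness_getLetterCombination : Int := 11

def Spec_getLetterCombination (input_data : Int) (out : List String) : Prop := out = getLetterCombination_alt input_data
instance (input_data : Int) (out : List String) : Decidable (Spec_getLetterCombination input_data out) := by unfold Spec_getLetterCombination; infer_instance

-- ===== CLAIM (what is proved, stated in full; the proofs are below) =====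
def Claim_equal_getLetterCombination : Prop := ∀ (input_data : Int), Dom_getLetterCombination input_data → Pre_getLetterCombination input_data → Spec_getLetterCombination input_data (getLetterCombination input_data)

-- ===== LEMMAS AND PROOFS =====

-- chars produced by Nat.toDigitsCore 10 map under int() to values in [0, 9]
theorem toDigitsCore_dval_bound (f : Nat) : ∀ (n : Nat) (l : List Char),
    (∀ c ∈ l, 0 ≤ (PySem.Int.ofChars? [c]).getD 0 ∧ (PySem.Int.ofChars? [c]).getD 0 ≤ 9) →
    ∀ c ∈ Nat.toDigitsCore 10 f n l,
      0 ≤ (PySem.Int.ofChars? [c]).getD 0 ∧ (PySem.Int.ofChars? [c]).getD 0 ≤ 9 := by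
  induction f with
  | zero => intro n l hl c hc; exact hl c hc
  | succ f ih =>
    intro n l hl c hc
    have hd : 0 ≤ (PySem.Int.ofChars? [Nat.digitChar (n % 10)]).getD 0 ∧
        (PySem.Int.ofChars? [Nat.digitChar (n % 10)]).getD 0 ≤ 9 := by
      have h10 : n % 10 < 10 := Nat.mod_lt _ (by omega)
      interval_cases h : n % 10 <;> decide
    simp only [Nat.toDigitsCore] at hc
    split at hc
    · rcases List.mem_cons.mp hc with h | h
      · subst h; exact hd
      · exact hl c h
    · refine ih (n / 10) _ ?_ c hc
      intro c' hc'
      rcases List.mem_cons.mp hc' with h | h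
      · subst h; exact hd
      · exact hl c' h

theorem ds_bound (n : Int) (h0 : 0 ≤ n) :
    ∀ x ∈ (PySem.Int.toChars n).map (fun c => (PySem.Int.ofChars? [c]).getD 0),
      0 ≤ x ∧ x ≤ 9 := by
  intro x hx
  rcases List.mem_map.mp hx with ⟨c, hc, rfl⟩
  have : ¬ n < 0 := not_lt.mpr h0
  simp only [PySem.Int.toChars, if_neg this, Nat.toDigits] at hc
  exact toDigitsCore_dval_bound _ _ [] (by simp) c hc

-- A's inner loop for a single-digit letter value appends to ret_string only
theorem innerA_single (v : Int) (key : Char) (hv : ¬ (PySem.Int.toChars v).length = 2)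
    (xs : List Int) (lc : List String) (rs : List Char) :
    xs.foldl (fun (s : List String × List Char) inp =>
      if (PySem.Int.toChars v).length = 2 ∧ v = inp then (s.1 ++ [String.singleton key], s.2)
      else if v = inp then (s.1, s.2 ++ [key]) else s) (lc, rs)
    = (lc, rs ++ List.replicate (xs.count v) key) := by
  induction xs generalizing lc rs with
  | nil => simp
  | cons x t ih =>
    simp only [List.foldl_cons]
    by_cases h : v = x
    · subst h
      rw [if_neg (by tauto), if_pos rfl, ih]
      simp [List.replicate_succ]
    · rw [if_neg (by tauto), if_neg h, ih]
      have h' : ¬ x = v := fun e => h e.symm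
      simp [h']

-- A's inner loop for a two-digit letter value appends to letter_combination only
theorem innerA_double (v : Int) (key : Char) (hv : (PySem.Int.toChars v).length = 2)
    (xs : List Int) (lc : List String) (rs : List Char) :
    xs.foldl (fun (s : List String × List Char) inp =>
      if (PySem.Int.toChars v).length = 2 ∧ v = inp then (s.1 ++ [String.singleton key], s.2)
      else if v = inp then (s.1, s.2 ++ [key]) else s) (lc, rs)
    = (lc ++ List.replicate (xs.count v) (String.singleton key), rs) := by
  induction xs generalizing lc rs with
  | nil => simp
  | cons x t ih =>
    simp only [List.foldl_cons]
    by_cases h : v = x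
    · subst h
      rw [if_pos ⟨hv, rfl⟩, ih]
      simp [List.replicate_succ]
    · rw [if_neg (by tauto), if_neg h, ih]
      have h' : ¬ x = v := fun e => h e.symm
      simp [h']

theorem letterMap_items : createLetterMap.items =
    [('a', 1), ('b', 2), ('c', 3), ('d', 4), ('e', 5), ('f', 6), ('g', 7), ('h', 8), ('i', 9), ('j', 10), ('k', 11), ('l', 12), ('m', 13), ('n', 14), ('o', 15), ('p', 16), ('q', 17), ('r', 18), ('s', 19), ('t', 20), ('u', 21), ('v', 22), ('w', 23), ('x', 24), ('y', 25), ('z', 26)] := by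
  decide

-- the full 26-letter loop of A, characterised by occurrence counts
theorem outerA (xs : List Int) :
    createLetterMap.items.foldl
      (fun (s : List String × List Char) kv =>
        xs.foldl
          (fun (s : List String × List Char) inp =>
            if (PySem.Int.toChars kv.2).length = 2 ∧ kv.2 = inp then
              (s.1 ++ [String.singleton kv.1], s.2)
            else if kv.2 = inp then (s.1, s.2 ++ [kv.1])
            else s) s)
      ([], [])
    = ((List.replicate (xs.count 10) (String.singleton 'j') ++ List.replicate (xs.count 11) (String.singleton 'k') ++ List.replicate (xs.count 12) (String.singleton 'l') ++ List.replicate (xs.count 13) (String.singleton 'm') ++ List.replicate (xs.count 14) (String.singleton 'n') ++ List.replicate (xs.count 15) (String.singleton 'o') ++ List.replicate (xs.count 16) (String.singleton 'p') ++ List.replicate (xs.count 17) (String.singleton 'q') ++ List.replicate (xs.count 18) (String.singleton 'r') ++ List.replicate (xs.count 19) (String.singleton 's') ++ List.replicate (xs.count 20) (String.singleton 't') ++ List.replicate (xs.count 21) (String.singleton 'u') ++ List.replicate (xs.count 22) (String.singleton 'v') ++ List.replicate (xs.count 23) (String.singleton 'w') ++ List.replicate (xs.count 24) (String.singleton 'x')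 ++ List.replicate (xs.count 25) (String.singleton 'y') ++ List.replicate (xs.count 26) (String.singleton 'z')),
       (List.replicate (xs.count 1) 'a' ++ List.replicate (xs.count 2) 'b' ++ List.replicate (xs.count 3) 'c' ++ List.replicate (xs.count 4) 'd' ++ List.replicate (xs.count 5) 'e' ++ List.replicate (xs.count 6) 'f' ++ List.replicate (xs.count 7) 'g' ++ List.replicate (xs.count 8) 'h' ++ List.replicate (xs.count 9) 'i')) := by
  rw [letterMap_items]
  simp only [List.foldl_cons, List.foldl_nil]
  rw [innerA_single 1 'a' (by decide)]
  rw [innerA_single 2 'b' (by decide)]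
  rw [innerA_single 3 'c' (by decide)]
  rw [innerA_single 4 'd' (by decide)]
  rw [innerA_single 5 'e' (by decide)]
  rw [innerA_single 6 'f' (by decide)]
  rw [innerA_single 7 'g' (by decide)]
  rw [innerA_single 8 'h' (by decide)]
  rw [innerA_single 9 'i' (by decide)]
  rw [innerA_double 10 'j' (by decide)]
  rw [innerA_double 11 'k' (by decide)]
  rw [innerA_double 12 'l' (by decide)]
  rw [innerA_double 13 'm' (by decide)]
  rw [innerA_double 14 'n' (by decide)]
  rw [innerA_double 15 'o' (by decide)]
  rw [innerA_double 16 'p' (by decide)]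
  rw [innerA_double 17 'q' (by decide)]
  rw [innerA_double 18 'r' (by decide)]
  rw [innerA_double 19 's' (by decide)]
  rw [innerA_double 20 't' (by decide)]
  rw [innerA_double 21 'u' (by decide)]
  rw [innerA_double 22 'v' (by decide)]
  rw [innerA_double 23 'w' (by decide)]
  rw [innerA_double 24 'x' (by decide)]
  rw [innerA_double 25 'y' (by decide)]
  rw [innerA_double 26 'z' (by decide)]
  simp [List.append_assoc]

theorem main_ge27 (n : Int) (h0 : 0 ≤ n) (h27 : 27 ≤ n) :
    getLetterCombination n = getLetterCombination_alt n := by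
  have hds := ds_bound n h0
  simp only [getLetterCombination, getLetterCombination_alt]
  rw [PySem.List.foldl_append_singleton_eq_map, List.nil_append]
  rw [outerA]
  have hcnt : ∀ v : Int, v ≤ 26 →
      List.count v (if (PySem.Int.toChars n).length = 2 then
          List.map (fun c => (PySem.Int.ofChars? [c]).getD 0) (PySem.Int.toChars n) ++ [n]
        else List.map (fun c => (PySem.Int.ofChars? [c]).getD 0) (PySem.Int.toChars n))
      = List.count v (List.map (fun c => (PySem.Int.ofChars? [c]).getD 0) (PySem.Int.toChars n)) := by
    intro v hv
    split
    · rw [List.count_append, List.count_eq_zero.mpr (by simp [show ¬ v = n by omega] : v ∉ [n])]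
      omega
    · rfl
  simp only [hcnt 1 (by norm_num), hcnt 2 (by norm_num), hcnt 3 (by norm_num), hcnt 4 (by norm_num), hcnt 5 (by norm_num), hcnt 6 (by norm_num), hcnt 7 (by norm_num), hcnt 8 (by norm_num), hcnt 9 (by norm_num), hcnt 10 (by norm_num), hcnt 11 (by norm_num), hcnt 12 (by norm_num), hcnt 13 (by norm_num), hcnt 14 (by norm_num), hcnt 15 (by norm_num), hcnt 16 (by norm_num), hcnt 17 (by norm_num), hcnt 18 (by norm_num), hcnt 19 (by norm_num), hcnt 20 (by norm_num), hcnt 21 (by norm_num), hcnt 22 (by norm_num), hcnt 23 (by norm_num), hcnt 24 (by norm_num), hcnt 25 (by norm_num), hcnt 26 (by norm_num)]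
  have hz : ∀ v : Int, 10 ≤ v →
      List.count v (List.map (fun c => (PySem.Int.ofChars? [c]).getD 0) (PySem.Int.toChars n)) = 0 := by
    intro v hv
    exact List.count_eq_zero.mpr (fun hm => by have := (hds v hm).2; omega)
  simp only [hz 10 (by norm_num), hz 11 (by norm_num), hz 12 (by norm_num), hz 13 (by norm_num), hz 14 (by norm_num), hz 15 (by norm_num), hz 16 (by norm_num), hz 17 (by norm_num), hz 18 (by norm_num), hz 19 (by norm_num), hz 20 (by norm_num), hz 21 (by norm_num), hz 22 (by norm_num), hz 23 (by norm_num), hz 24 (by norm_num), hz 25 (by norm_num), hz 26 (by norm_num)]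
  rw [← PySem.Dict.counter_eq_foldl]
  simp only [PySem.Dict.getD_counter]
  rw [if_neg (by omega : ¬ (10 ≤ n ∧ n ≤ 26))]
  simp only [List.replicate_zero, List.nil_append, List.append_nil]
  rw [show PySem.List.pyRange 1 10 1 = [1,2,3,4,5,6,7,8,9] from by decide]
  simp only [List.flatMap_cons, List.flatMap_nil, PySem.List.pyRepeat_singleton,
    Int.toNat_natCast, List.append_nil, show Char.ofNat ((96+(1:Int)).toNat) = 'a' from rfl, show Char.ofNat ((96+(2:Int)).toNat) = 'b' from rfl, show Char.ofNat ((96+(3:Int)).toNat) = 'c' from rfl, show Char.ofNat ((96+(4:Int)).toNat) = 'd' from rfl, show Char.ofNat ((96+(5:Int)).toNat) = 'e' from rfl, show Char.ofNat ((96+(6:Int)).toNat) = 'f' from rfl, show Char.ofNat ((96+(7:Int)).toNat) = 'g' from rfl, show Char.ofNat ((96+(8:Int)).toNat) = 'h' from rfl, show Char.ofNat ((96+(9:Int)).toNat) = 'i' from rfl]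
  simp only [List.append_assoc]

-- ===== VERDICT (by name: the statement is the Claim_ definition above) =====
theorem getLetterCombination_spec : Claim_equal_getLetterCombination := by
  intro n _ hpre
  unfold Spec_getLetterCombination
  by_cases hle : n ≤ 26
  · have h0 : (0 : Int) ≤ n := hpre
    interval_cases n <;> decide
  · exact main_ge27 n hpre (by omega)
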